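-- pv_equiv track=rewrite | github.com/oThought/AdventofCode | 2023/Day1/Day1.py | checklineSTR
-- ===== SOURCE A (Python) =====
-- def checkstring(string, number):
--     positions = []
--     start = 0
--     while True:
--         start = string.find(number, start)
--         if start == -1:
--             break
--         positions.append(start)
--         start += 1
--     return positions
--
-- def checklineSTR(line):
--     numbers = ["one", "two", "three", "four", "five", "six", "seven", "eight", "nine"]
--     output = []
--     for number in numbers:
--         if number in line:
--             positions = checkstring(line, number)
--             for position in positions:
--                 output.append(int(f"{position}{numbers.index(number)}")+11)
--     return output
-- ===== SOURCE B (Python) =====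
-- def checklineSTR(line):
--     words = ["one", "two", "three", "four", "five", "six", "seven", "eight", "nine"]
--     matches = [(k, i) for i in range(len(line))
--                for k, w in enumerate(words) if line.startswith(w, i)]
--     return [int(f"{i}{k}") + 11 for idx in range(9)
--             for (k, i) in matches if k == idx]
-- ===== Notes on version B (the rewrite author's own statement) =====
-- stated objective: alternative
-- what changed: Replaces A's per-word repeated find(start) scans (with membership pre-check and numbers.index lookup) by a single positional scan that tests all nine words with startswith at each index, building a flat (word, position) match table, and then emits the word-major output by grouping that table per word index.
import Mathlib
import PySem

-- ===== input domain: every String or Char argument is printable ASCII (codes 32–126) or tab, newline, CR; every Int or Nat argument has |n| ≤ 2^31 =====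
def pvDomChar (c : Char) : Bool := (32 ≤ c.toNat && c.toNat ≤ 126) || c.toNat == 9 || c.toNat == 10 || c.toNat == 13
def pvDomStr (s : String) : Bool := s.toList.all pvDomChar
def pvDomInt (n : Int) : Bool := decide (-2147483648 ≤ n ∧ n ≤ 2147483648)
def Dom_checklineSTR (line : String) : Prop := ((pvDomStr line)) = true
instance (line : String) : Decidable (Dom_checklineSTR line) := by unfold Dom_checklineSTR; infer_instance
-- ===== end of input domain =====

-- B replaces A's per-word repeated find() scans by one positional startswith scan building a
-- flat (word, position) match table that is then grouped per word (objective: alternative).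

-- ===== PORT A =====

-- facts about findFrom that the recursion of checkstringAux cites for termination
theorem pvFindFromFacts (s sub : List Char) (start : Nat)
    (h : PySem.Chars.findFrom s sub (start : Int) none ≠ -1) :
    (start : Int) ≤ PySem.Chars.findFrom s sub (start : Int) none ∧ start ≤ s.length := by
  by_cases hle : start ≤ s.length
  · exact ⟨(PySem.Chars.findFrom_natCast_spec s sub start hle h).1, hle⟩
  · exfalso
    apply h
    simp only [PySem.Chars.findFrom]
    rw [if_neg (show ¬((start : Int) < 0) by omega)]
    rw [if_pos (show ((s.length : Int) < (start : Int)) by omega)]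

-- A's checkstring loop: 'while True: start = string.find(number, start);
-- if start == -1: break; positions.append(start); start += 1'
def checkstringAux (s sub : List Char) (positions : List Int) (start : Nat) : List Int :=
  let f := PySem.Chars.findFrom s sub (start : Int) none
  if h : f = -1 then positions
  else checkstringAux s sub (positions ++ [f]) (f.toNat + 1)
termination_by s.length + 1 - start
decreasing_by
  have := pvFindFromFacts s sub start h
  omega

def checkstring (string number : List Char) : List Int :=
  checkstringAux string number [] 0

def checklineSTR (line : String) : List Int :=
  let numbers : List (List Char) :=
    ["one".toList, "two".toList, "three".toList, "four".toList, "five".toList,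
     "six".toList, "seven".toList, "eight".toList, "nine".toList]
  numbers.foldl (fun output number =>
    if PySem.Chars.isIn number line.toList then
      (checkstring line.toList number).foldl (fun output position =>
        output ++ [(PySem.Int.ofChars? (PySem.Int.toChars position ++
          PySem.Int.toChars (((PySem.List.index? numbers number).getD 0 : Nat) : Int))).getD 0 + 11]) output
    else output) []

-- ===== PORT B =====
-- line.startswith(w, i) for 0 ≤ i < len(line) is exactly 'w is a prefix of line[i:]'
def checklineSTR_alt (line : String) : List Int :=
  let words : List (List Char) :=
    ["one".toList, "two".toList, "three".toList, "four".toList, "five".toList,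
     "six".toList, "seven".toList, "eight".toList, "nine".toList]
  let ms : List (Int × Nat) :=
    (List.range line.toList.length).flatMap (fun i =>
      (PySem.List.enumerate words).flatMap (fun kw =>
        if PySem.Chars.startswith (line.toList.drop i) kw.2 then [(kw.1, i)] else []))
  (List.range 9).flatMap (fun (idx : Nat) =>
    (ms.filter (fun m => m.1 == (idx : Int))).map (fun m =>
      (PySem.Int.ofChars? (PySem.Int.toChars (m.2 : Int) ++
        PySem.Int.toChars (idx : Int))).getD 0 + 11))

-- ===== PRECONDITION & SPEC =====
def Spec_checklineSTR (line : String) (out : List Int) : Prop := out = checklineSTR_alt line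
instance (line : String) (out : List Int) : Decidable (Spec_checklineSTR line out) := by unfold Spec_checklineSTR; infer_instance

-- ===== CLAIM (what is proved, stated in full; the proofs are below) =====
def Claim_equal_checklineSTR : Prop := ∀ (line : String), Dom_checklineSTR line → Spec_checklineSTR line (checklineSTR line)

-- ===== LEMMAS AND PROOFS =====

-- checkstring appends, in ascending order, exactly the indices where the word is a prefix
theorem checkstringAux_eq (s sub : List Char) (hsub : sub ≠ []) (positions : List Int) (start : Nat) :
    checkstringAux s sub positions start =
      positions ++ ((List.range' start (s.length + 1 - start)).filter
        (fun j => decide (sub <+: s.drop j))).map (fun j : Nat => (j : Int)) := by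
  induction positions, start using checkstringAux.induct s sub with
  | case1 positions start f hf =>
    rw [checkstringAux, dif_pos hf]
    have hnil : ((List.range' start (s.length + 1 - start)).filter
        (fun j => decide (sub <+: s.drop j))) = [] := by
      rw [List.filter_eq_nil_iff]
      intro j hj
      simp only [List.mem_range'_1] at hj
      by_cases hle : start ≤ s.length
      · have hne := (PySem.Chars.findFrom_natCast_eq_neg_one_iff s sub start hle).mp hf
        simp only [decide_eq_true_eq]
        intro hpre
        apply hne
        rw [← PySem.Chars.isIn_iff_infix, ← PySem.Chars.exists_prefix_drop_iff_isIn]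
        refine ⟨j - start, ?_⟩
        rw [List.drop_drop]
        rwa [show start + (j - start) = j by omega]
      · omega
    simp [hnil]
  | case2 positions start f hf ih =>
    rw [checkstringAux, dif_neg hf]
    rw [ih]
    have hfacts := pvFindFromFacts s sub start hf
    have hspec := PySem.Chars.findFrom_natCast_spec s sub start hfacts.2 hf
    set m := (PySem.Chars.findFrom s sub (start : Int) none).toNat with hm
    have hstartm : start ≤ m := by omega
    have hpre : sub <+: s.drop m := hspec.2.1
    have hmlen : m < s.length := by
      have hl := hpre.length_le
      have : 0 < sub.length := List.length_pos_iff.mpr hsub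
      simp only [List.length_drop] at hl
      omega
    have hsplit : List.range' start (s.length + 1 - start) =
        List.range' start (m - start) ++ m :: List.range' (m + 1) (s.length - m) := by
      have e1 : s.length + 1 - start = (m - start) + (s.length - m + 1) := by omega
      rw [e1, ← List.range'_append (step := 1)]
      rw [show start + 1 * (m - start) = m by omega, List.range'_succ]
    rw [hsplit, List.filter_append]
    have h1 : (List.range' start (m - start)).filter (fun j => decide (sub <+: s.drop j)) = [] := by
      rw [List.filter_eq_nil_iff]
      intro j hj
      simp only [List.mem_range'_1] at hj
      simpa using hspec.2.2 j hj.1 (by omega)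
    rw [h1]
    rw [List.filter_cons_of_pos (by simpa using hpre)]
    have hlen2 : s.length + 1 - (m + 1) = s.length - m := by omega
    rw [hlen2]
    have hcast : ((m : Nat) : Int) = PySem.Chars.findFrom s sub (start : Int) none := by
      rw [hm]; exact Int.toNat_of_nonneg (by omega)
    simp only [List.nil_append, List.map_cons]
    rw [List.append_assoc, show f = ((m : Nat) : Int) from hcast.symm]
    rfl

theorem checkstring_eq (s sub : List Char) (hsub : sub ≠ []) :
    checkstring s sub =
      ((List.range s.length).filter (fun j => decide (sub <+: s.drop j))).map (fun j : Nat => (j : Int)) := by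
  rw [checkstring, checkstringAux_eq s sub hsub]
  rw [show s.length + 1 - 0 = s.length + 1 by omega, ← List.range_eq_range']
  rw [List.range_succ, List.filter_append]
  have : (List.filter (fun j => decide (sub <+: s.drop j)) [s.length]) = [] := by
    simp [List.drop_length, List.prefix_nil, hsub]
  rw [this]
  simp

-- the canonical contribution of one word: its match positions ascending, encoded
def pvChunk (cs w : List Char) (k : Int) : List Int :=
  ((List.range cs.length).filter (fun i => decide (w <+: cs.drop i))).map (fun i : Nat =>
    (PySem.Int.ofChars? (PySem.Int.toChars (i : Int) ++ PySem.Int.toChars k)).getD 0 + 11)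

-- one iteration of A's word loop produces the canonical chunk
theorem pvAChunk (cs w : List Char) (k : Int) (hw : w ≠ []) (acc : List Int) :
    (if PySem.Chars.isIn w cs then
      (checkstring cs w).foldl (fun output position =>
        output ++ [(PySem.Int.ofChars? (PySem.Int.toChars position ++
          PySem.Int.toChars k)).getD 0 + 11]) acc
    else acc) = acc ++ pvChunk cs w k := by
  by_cases hin : PySem.Chars.isIn w cs
  · rw [if_pos hin, PySem.List.foldl_append_singleton_eq_map, checkstring_eq cs w hw]
    rw [pvChunk, List.map_map]
    rfl
  · rw [if_neg hin, pvChunk]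
    have : (List.range cs.length).filter (fun i => decide (w <+: cs.drop i)) = [] := by
      rw [List.filter_eq_nil_iff]
      intro j hj
      simp only [decide_eq_true_eq]
      intro hpre
      have : PySem.Chars.isIn w cs = true := by
        rw [← PySem.Chars.exists_prefix_drop_iff_isIn]
        exact ⟨j, hpre⟩
      exact hin this
    rw [this]
    simp

def pvWords : List (List Char) :=
  ["one".toList, "two".toList, "three".toList, "four".toList, "five".toList,
   "six".toList, "seven".toList, "eight".toList, "nine".toList]

theorem pvStartswithEq (s p : List Char) :
    PySem.Chars.startswith s p = decide (p <+: s) := by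
  by_cases h : p <+: s
  · simp [PySem.Chars.startswith_iff, h]
  · cases hb : PySem.Chars.startswith s p
    · simp [h]
    · exact absurd ((PySem.Chars.startswith_iff s p).mp hb) h

-- a comprehension '[f(i) for i in l if p(i)]' written as a flatMap
theorem pvFlatMapIte {α : Type} (l : List Nat) (p : Nat → Bool) (f : Nat → α) :
    l.flatMap (fun i => if p i then [f i] else []) = (l.filter p).map f := by
  induction l with
  | nil => rfl
  | cons a t ih => by_cases h : p a <;> simp [List.flatMap_cons, h, ih]

theorem pvFilterIte {α : Type} (q : α → Bool) (c : Prop) [Decidable c] (x y : List α) :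
    (if c then x else y).filter q = if c then x.filter q else y.filter q := by
  split <;> rfl

-- B's match table restricted to word k is that word's ascending position list
theorem pvMsFilter (cs : List Char) (k : Nat) (hk : k < 9) :
    ((List.range cs.length).flatMap (fun i =>
        (PySem.List.enumerate pvWords).flatMap (fun kw =>
          if PySem.Chars.startswith (cs.drop i) kw.2 then [(kw.1, i)] else []))).filter
      (fun m => m.1 == (k : Int))
    = ((List.range cs.length).filter (fun i => decide (pvWords.getD k [] <+: cs.drop i))).map
        (fun i => ((k : Int), i)) := by
  rw [List.filter_flatMap]
  have hinner : ∀ i : Nat,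
      ((PySem.List.enumerate pvWords).flatMap (fun kw =>
          if PySem.Chars.startswith (cs.drop i) kw.2 then [(kw.1, i)] else [])).filter
        (fun m => m.1 == (k : Int))
      = if decide (pvWords.getD k [] <+: cs.drop i) then [((k : Int), i)] else [] := by
    intro i
    interval_cases k <;>
      simp [pvWords, PySem.List.enumerate, List.filter_append, pvFilterIte, pvStartswithEq]
  simp only [hinner]
  exact pvFlatMapIte _ _ _

theorem pvBChunk (cs : List Char) (k : Nat) (hk : k < 9) :
    (((List.range cs.length).flatMap (fun i =>
        (PySem.List.enumerate pvWords).flatMap (fun kw =>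
          if PySem.Chars.startswith (cs.drop i) kw.2 then [(kw.1, i)] else []))).filter
      (fun m => m.1 == (k : Int))).map (fun m =>
        (PySem.Int.ofChars? (PySem.Int.toChars (m.2 : Int) ++
          PySem.Int.toChars (k : Int))).getD 0 + 11)
    = pvChunk cs (pvWords.getD k []) (k : Int) := by
  rw [pvMsFilter cs k hk, List.map_map, pvChunk]
  rfl

theorem pvMain (line : String) : checklineSTR line = checklineSTR_alt line := by
  have hrange : List.range 9 = [0, 1, 2, 3, 4, 5, 6, 7, 8] := by decide
  simp only [checklineSTR, checklineSTR_alt, hrange, List.foldl_cons, List.foldl_nil,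
    List.flatMap_cons, List.flatMap_nil]
  simp only [show ["one".toList, "two".toList, "three".toList, "four".toList, "five".toList,
     "six".toList, "seven".toList, "eight".toList, "nine".toList] = pvWords from rfl]
  rw [pvAChunk line.toList "one".toList _ (by decide),
     pvAChunk line.toList "two".toList _ (by decide),
     pvAChunk line.toList "three".toList _ (by decide),
     pvAChunk line.toList "four".toList _ (by decide),
     pvAChunk line.toList "five".toList _ (by decide),
     pvAChunk line.toList "six".toList _ (by decide),
     pvAChunk line.toList "seven".toList _ (by decide),
     pvAChunk line.toList "eight".toList _ (by decide),
     pvAChunk line.toList "nine".toList _ (by decide)]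
  rw [pvBChunk line.toList 0 (by omega), pvBChunk line.toList 1 (by omega),
     pvBChunk line.toList 2 (by omega), pvBChunk line.toList 3 (by omega),
     pvBChunk line.toList 4 (by omega), pvBChunk line.toList 5 (by omega),
     pvBChunk line.toList 6 (by omega), pvBChunk line.toList 7 (by omega),
     pvBChunk line.toList 8 (by omega)]
  simp only [show (PySem.List.index? pvWords "one".toList).getD 0 = (0 : Nat) from by decide,
    show (PySem.List.index? pvWords "two".toList).getD 0 = (1 : Nat) from by decide,
    show (PySem.List.index? pvWords "three".toList).getD 0 = (2 : Nat) from by decide,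
    show (PySem.List.index? pvWords "four".toList).getD 0 = (3 : Nat) from by decide,
    show (PySem.List.index? pvWords "five".toList).getD 0 = (4 : Nat) from by decide,
    show (PySem.List.index? pvWords "six".toList).getD 0 = (5 : Nat) from by decide,
    show (PySem.List.index? pvWords "seven".toList).getD 0 = (6 : Nat) from by decide,
    show (PySem.List.index? pvWords "eight".toList).getD 0 = (7 : Nat) from by decide,
    show (PySem.List.index? pvWords "nine".toList).getD 0 = (8 : Nat) from by decide,
    show pvWords.getD 0 [] = "one".toList from by decide,
    show pvWords.getD 1 [] = "two".toList from by decide,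
    show pvWords.getD 2 [] = "three".toList from by decide,
    show pvWords.getD 3 [] = "four".toList from by decide,
    show pvWords.getD 4 [] = "five".toList from by decide,
    show pvWords.getD 5 [] = "six".toList from by decide,
    show pvWords.getD 6 [] = "seven".toList from by decide,
    show pvWords.getD 7 [] = "eight".toList from by decide,
    show pvWords.getD 8 [] = "nine".toList from by decide]
  simp [List.append_assoc]

-- ===== VERDICT (by name: the statement is the Claim_ definition above) =====
theorem checklineSTR_spec : Claim_equal_checklineSTR := by
  intro line _
  exact pvMain line
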